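-- pv_equiv track=rewrite | github.com/pypi-data/pypi-mirror-402 | packages/caex2/caex2-1.0.2.tar.gz/caex2-1.0.2/caex2/extractor.py | get_challenge_blocks
-- ===== SOURCE A (Python) =====
-- def get_challenge_blocks(episode_lines):
--     challenge_blocks = []
--     block = []
--     for line in episode_lines:
--         if line.startswith(':'):
--             if line.__contains__('challenge'):
--                 block.append(line.strip())
--             elif line.__contains__('solution'):
--                 block.append(line.strip())
--                 challenge_blocks.append(block)
--                 block = []
--         else:
--             if len(block) > 0:
--                 block.append(line.strip())
--     stripped_challenges = ['\n'.join(strip_challenge_new(c)) for c in challenge_blocks]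
--     return stripped_challenges
--
-- def strip_challenge_new(block):
--     stripped_block = []
--     for line in block:
--         if not line.startswith(':'):
--             line_stripped = line[0:].strip()
--             stripped_block.append(line_stripped)
--     return stripped_block
-- ===== SOURCE B (Python) =====
-- def get_challenge_blocks(episode_lines):
--     results = []
--     body = []
--     active = False
--     for line in episode_lines:
--         if line.startswith(':'):
--             if 'challenge' in line:
--                 active = True
--             elif 'solution' in line:
--                 results.append('\n'.join(body))
--                 body = []
--                 active = False
--         elif active:
--             s = line.strip()
--             if not s.startswith(':'):
--                 body.append(s)
--     return results
-- ===== Notes on version B (the rewrite author's own statement) =====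
-- stated objective: simpler
-- what changed: Replaced A's two-phase design (collect raw blocks including header lines, then post-process each block with a helper that filters and re-strips) by a single-pass loop that keeps only the stripped body lines and an active flag and emits the joined text directly on each solution line, dropping the helper function entirely.
import Mathlib
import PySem

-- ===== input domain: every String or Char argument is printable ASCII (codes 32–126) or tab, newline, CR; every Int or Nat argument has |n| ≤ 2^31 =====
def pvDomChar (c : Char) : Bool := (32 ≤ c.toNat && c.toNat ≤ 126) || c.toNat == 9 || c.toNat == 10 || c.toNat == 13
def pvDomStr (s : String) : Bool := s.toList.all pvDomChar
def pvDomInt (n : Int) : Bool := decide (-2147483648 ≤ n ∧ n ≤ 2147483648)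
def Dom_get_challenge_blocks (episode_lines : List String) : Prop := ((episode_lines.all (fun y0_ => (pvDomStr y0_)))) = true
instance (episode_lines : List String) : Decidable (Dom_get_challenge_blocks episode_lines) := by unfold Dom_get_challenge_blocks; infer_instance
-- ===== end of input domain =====

-- B replaces A's collect-blocks-then-post-process design by a single pass that keeps only the
-- stripped body lines and an active flag (objective: simpler; same asymptotic cost).

-- ===== PORT A =====
-- helper strip_challenge_new
def stripChallengeNew (block : List String) : List String :=
  block.foldl
    (fun stripped_block line =>
      if !(PySem.Str.startswith line ":") then
        stripped_block ++ [PySem.Str.strip (PySem.Str.slice line (some 0) none)]  -- line[0:].strip()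
      else stripped_block)
    []

-- loop body of A's for-loop (state: (challenge_blocks, block))
def pvStepA (st : List (List String) × List String) (line : String) :
    List (List String) × List String :=
  if PySem.Str.startswith line ":" then
    if PySem.Str.isIn "challenge" line then (st.1, st.2 ++ [PySem.Str.strip line])
    else if PySem.Str.isIn "solution" line then (st.1 ++ [st.2 ++ [PySem.Str.strip line]], [])
    else st
  else
    if 0 < PySem.List.len st.2 then (st.1, st.2 ++ [PySem.Str.strip line]) else st

def get_challenge_blocks (episode_lines : List String) : List String :=
  let st := episode_lines.foldl pvStepA ([], [])
  st.1.map (fun c => PySem.Str.join "\n" (stripChallengeNew c))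

-- ===== PORT B =====
-- loop body of B's for-loop (state: (results, body, active))
def pvStepB (st : List String × List String × Bool) (line : String) :
    List String × List String × Bool :=
  if PySem.Str.startswith line ":" then
    if PySem.Str.isIn "challenge" line then (st.1, st.2.1, true)
    else if PySem.Str.isIn "solution" line then
      (st.1 ++ [PySem.Str.join "\n" st.2.1], [], false)
    else st
  else if st.2.2 then
    let s := PySem.Str.strip line
    if !(PySem.Str.startswith s ":") then (st.1, st.2.1 ++ [s], st.2.2) else st
  else st

def get_challenge_blocks_alt (episode_lines : List String) : List String :=
  (episode_lines.foldl pvStepB ([], [], false)).1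

-- ===== PRECONDITION & SPEC =====
def Spec_get_challenge_blocks (episode_lines : List String) (out : List String) : Prop := out = get_challenge_blocks_alt episode_lines
instance (episode_lines : List String) (out : List String) : Decidable (Spec_get_challenge_blocks episode_lines out) := by unfold Spec_get_challenge_blocks; infer_instance

-- ===== CLAIM (what is proved, stated in full; the proofs are below) =====
def Claim_equal_get_challenge_blocks : Prop := ∀ (episode_lines : List String), Dom_get_challenge_blocks episode_lines → Spec_get_challenge_blocks episode_lines (get_challenge_blocks episode_lines)

-- ===== LEMMAS AND PROOFS =====

lemma dw_rev_prefix (p : Char → Bool) (l : List Char) :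
    (List.dropWhile p l.reverse).reverse <+: l := by
  have h : List.dropWhile p l.reverse <:+ l.reverse := List.dropWhile_suffix p
  simpa using List.reverse_prefix.mpr h

lemma dw_lr (p : Char → Bool) (l : List Char) (h : List.dropWhile p l = l) :
    List.dropWhile p (List.dropWhile p l.reverse).reverse = (List.dropWhile p l.reverse).reverse := by
  cases hre : (List.dropWhile p l.reverse).reverse with
  | nil => simp
  | cons c w =>
    have hpre : (List.dropWhile p l.reverse).reverse <+: l := dw_rev_prefix p l
    rw [hre] at hpre
    obtain ⟨t, ht⟩ := hpre
    have hc : p c = false := by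
      by_contra hb
      rw [← ht, List.cons_append, List.dropWhile_cons,
        if_pos (by simpa using eq_true_of_ne_false hb)] at h
      have h1 := List.length_dropWhile_le p (w ++ t)
      have h2 := congrArg List.length h
      simp [List.length_append] at h1 h2
      omega
    simp [hc]

lemma chars_strip_strip (cs : List Char) :
    PySem.Chars.strip (PySem.Chars.strip cs) = PySem.Chars.strip cs := by
  simp only [PySem.Chars.strip, PySem.Chars.lstrip, PySem.Chars.rstrip]
  rw [dw_lr _ _ (List.dropWhile_idempotent _ _), List.reverse_reverse]
  exact dw_lr _ _ (List.dropWhile_idempotent _ _)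

lemma chars_strip_colon (t : List Char) :
    PySem.Chars.startswith (PySem.Chars.strip (':' :: t)) [':'] = true := by
  simp only [PySem.Chars.strip, PySem.Chars.lstrip, PySem.Chars.rstrip]
  have h1 : PySem.Chars.isspace ':' = false := by decide
  rw [List.dropWhile_cons, if_neg (by simp [h1]), List.reverse_cons, List.dropWhile_append]
  by_cases he : (List.dropWhile PySem.Chars.isspace t.reverse).isEmpty
  · simp [he, h1, PySem.Chars.startswith, List.isPrefixOf]
  · simp [he, PySem.Chars.startswith, List.isPrefixOf]

lemma str_strip_strip (s : String) : PySem.Str.strip (PySem.Str.strip s) = PySem.Str.strip s := by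
  simp [PySem.Str.strip, chars_strip_strip]

lemma str_strip_colon (s : String) (h : PySem.Str.startswith s ":" = true) :
    PySem.Str.startswith (PySem.Str.strip s) ":" = true := by
  have h' : [':'] <+: s.toList := by
    have := PySem.Chars.startswith_iff (s := s.toList) (p := [':'])
    simp [PySem.Str.startswith] at h
    exact this.mp (by simpa using h)
  obtain ⟨t, ht⟩ := h'
  have ht' : s.toList = ':' :: t := by simpa using ht.symm
  simp [PySem.Str.startswith, PySem.Str.strip, ht', chars_strip_colon]

lemma str_slice0 (s : String) : PySem.Str.slice s (some 0) none = s := by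
  simp [PySem.Str.slice]

lemma scn_append (block : List String) (x : String) :
    stripChallengeNew (block ++ [x]) =
      stripChallengeNew block ++
        (if !(PySem.Str.startswith x ":") then
          [PySem.Str.strip (PySem.Str.slice x (some 0) none)] else []) := by
  simp only [stripChallengeNew, List.foldl_append, List.foldl_cons, List.foldl_nil]
  split_ifs <;> simp_all

-- the joined result of A's post-processed block equals B's joined body
def pvF (c : List String) : String := PySem.Str.join "\n" (stripChallengeNew c)

lemma loop_agree (lines : List String) (cbs : List (List String)) (block : List String) :
    (lines.foldl pvStepB (cbs.map pvF, stripChallengeNew block, !block.isEmpty)).1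
      = ((lines.foldl pvStepA (cbs, block)).1).map pvF := by
  induction lines generalizing cbs block with
  | nil => simp
  | cons line rest ih =>
    simp only [List.foldl_cons]
    by_cases hcol : PySem.Chars.startswith line.toList [':'] = true
    · have hcolS : PySem.Str.startswith line ":" = true := by
        simpa [PySem.Str.startswith] using hcol
      have hb : stripChallengeNew (block ++ [PySem.Str.strip line]) = stripChallengeNew block := by
        rw [scn_append, str_strip_colon line hcolS]; simp
      by_cases hch : PySem.Str.isIn "challenge" line = true
      all_goals simp at hch
      · have := ih cbs (block ++ [PySem.Str.strip line])
        have hne : (block ++ [PySem.Str.strip line]).isEmpty = false := by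
          cases block <;> simp
        rw [hb, hne] at this
        simpa [pvStepA, pvStepB, hcol, hch] using this
      · by_cases hso : PySem.Str.isIn "solution" line = true
        all_goals simp at hso
        · have hpv : pvF (block ++ [PySem.Str.strip line]) =
              PySem.Str.join "\n" (stripChallengeNew block) := by
            unfold pvF; rw [hb]
          have := ih (cbs ++ [block ++ [PySem.Str.strip line]]) []
          simpa [pvStepA, pvStepB, hcol, hch, hso, hpv,
            show stripChallengeNew [] = [] from rfl] using this
        · simpa [pvStepA, pvStepB, hcol, hch, hso] using ih cbs block
    · cases block with
      | nil => simpa [pvStepA, pvStepB, hcol, PySem.List.len, stripChallengeNew] using ih cbs []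
      | cons b bs =>
        have hb : stripChallengeNew ((b :: bs) ++ [PySem.Str.strip line]) =
            stripChallengeNew (b :: bs) ++
              (if !(PySem.Str.startswith (PySem.Str.strip line) ":") then
                [PySem.Str.strip line] else []) := by
          rw [scn_append, str_slice0, str_strip_strip]
        have := ih cbs ((b :: bs) ++ [PySem.Str.strip line])
        rw [hb] at this
        by_cases hsc : PySem.Chars.startswith (PySem.Chars.strip line.toList) [':'] = true
        · have hscS : PySem.Str.startswith (PySem.Str.strip line) ":" = true := by
            simpa [PySem.Str.startswith, PySem.Str.strip] using hsc
          rw [hscS] at this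
          simpa [pvStepA, pvStepB, hcol, hsc, PySem.List.len_eq] using this
        · have hscS : PySem.Str.startswith (PySem.Str.strip line) ":" = false := by
            simp [PySem.Str.startswith, PySem.Str.strip]
            simpa [PySem.Str.startswith, PySem.Str.strip] using hsc
          rw [hscS] at this
          simpa [pvStepA, pvStepB, hcol, hsc, PySem.List.len_eq] using this

-- ===== VERDICT (by name: the statement is the Claim_ definition above) =====
theorem get_challenge_blocks_spec : Claim_equal_get_challenge_blocks := by
  intro lines _
  unfold Spec_get_challenge_blocks get_challenge_blocks get_challenge_blocks_alt
  exact (loop_agree lines [] []).symm
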